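-- pv_equiv track=rewrite | github.com/fut33v/wattattack_script | webapp/main.py | _match_favorite_bike_id
-- ===== SOURCE A (Python) =====
-- from typing import Any, Dict, List, Optional, Tuple
--
-- def _match_favorite_bike_id(favorite_raw: Optional[str], bikes_map: Dict[int, Dict[str, Any]]) -> Optional[int]:
--     if not favorite_raw:
--         return None
--     needle = favorite_raw.strip().lower()
--     if not needle:
--         return None
--
--     exact_matches: List[int] = []
--     partial_matches: List[int] = []
--
--     for bike_id, bike in bikes_map.items():
--         title = (bike.get("title") or "").strip().lower()
--         owner = (bike.get("owner") or "").strip().lower()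
--         if title == needle or owner == needle:
--             exact_matches.append(bike_id)
--         elif needle in title or (owner and needle in owner):
--             partial_matches.append(bike_id)
--
--     if exact_matches:
--         return exact_matches[0]
--     if partial_matches:
--         return partial_matches[0]
--     return None
-- ===== SOURCE B (Python) =====
-- from typing import Any, Dict, Optional
--
--
-- def _match_favorite_bike_id(favorite_raw: Optional[str], bikes_map: Dict[int, Dict[str, Any]]) -> Optional[int]:
--     if not favorite_raw:
--         return None
--     needle = favorite_raw.strip().lower()
--     if not needle:
--         return None
--
--     # First pass: return the first exact match immediately.
--     for bike_id, bike in bikes_map.items():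
--         title = (bike.get("title") or "").strip().lower()
--         owner = (bike.get("owner") or "").strip().lower()
--         if title == needle or owner == needle:
--             return bike_id
--
--     # No exact match anywhere: return the first partial match.
--     for bike_id, bike in bikes_map.items():
--         title = (bike.get("title") or "").strip().lower()
--         owner = (bike.get("owner") or "").strip().lower()
--         if needle in title or (owner and needle in owner):
--             return bike_id
--
--     return None
-- ===== Notes on version B (the rewrite author's own statement) =====
-- stated objective: idiomatic
-- what changed: Replaced A's single pass that collects exact_matches and partial_matches lists and inspects them after the loop with two short-circuiting scans: return the first exact match immediately, otherwise scan again for the first partial match.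
import Mathlib
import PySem

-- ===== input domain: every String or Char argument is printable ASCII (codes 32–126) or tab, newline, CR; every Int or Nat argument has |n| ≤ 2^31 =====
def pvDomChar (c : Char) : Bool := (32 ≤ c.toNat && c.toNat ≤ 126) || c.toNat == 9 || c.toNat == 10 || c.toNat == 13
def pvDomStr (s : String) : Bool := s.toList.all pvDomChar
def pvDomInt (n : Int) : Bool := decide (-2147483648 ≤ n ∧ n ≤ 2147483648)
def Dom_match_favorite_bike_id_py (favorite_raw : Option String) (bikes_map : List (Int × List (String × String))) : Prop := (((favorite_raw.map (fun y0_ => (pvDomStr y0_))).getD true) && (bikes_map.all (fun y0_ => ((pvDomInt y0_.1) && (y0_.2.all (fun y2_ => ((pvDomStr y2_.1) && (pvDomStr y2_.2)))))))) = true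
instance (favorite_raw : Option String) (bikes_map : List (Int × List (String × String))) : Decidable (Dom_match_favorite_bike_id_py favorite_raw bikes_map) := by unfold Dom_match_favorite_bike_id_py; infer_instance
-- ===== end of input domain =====

-- B is an idiomatic two-phase rewrite: two short-circuiting scans (first exact match, else first
-- partial match) instead of A's single collecting pass with post-loop list checks; same cost class.

-- ===== PORT A =====
-- bike.get(k) on the association list: first match (dict keys are unique), then `or ""`.
def pvBikeField (bike : List (String × String)) (k : String) : String :=
  ((bike.find? (fun p => p.1 == k)).map (·.2)).getD ""

-- `(bike.get(k) or "").strip().lower()`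
def pvNorm (bike : List (String × String)) (k : String) : String :=
  PySem.Str.lower (PySem.Str.strip (pvBikeField bike k))

def match_favorite_bike_id_py (favorite_raw : Option String) (bikes_map : List (Int × List (String × String))) : Option Int :=
  match favorite_raw with
  | none => none
  | some fav =>
    if fav = "" then none
    else
      let needle := PySem.Str.lower (PySem.Str.strip fav)
      if needle = "" then none
      else
        let st := bikes_map.foldl (fun (acc : List Int × List Int) bp =>
          let title := pvNorm bp.2 "title"
          let owner := pvNorm bp.2 "owner"
          if title = needle ∨ owner = needle then (acc.1 ++ [bp.1], acc.2)
          else if PySem.Str.isIn needle title ∨ (owner ≠ "" ∧ PySem.Str.isIn needle owner) then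
            (acc.1, acc.2 ++ [bp.1])
          else acc) ([], [])
        match st.1 with
        | e :: _ => some e
        | [] =>
          match st.2 with
          | p :: _ => some p
          | [] => none

-- ===== PORT B =====
def pvExact (needle : String) (bp : Int × List (String × String)) : Bool :=
  pvNorm bp.2 "title" = needle || pvNorm bp.2 "owner" = needle

def pvPartial (needle : String) (bp : Int × List (String × String)) : Bool :=
  PySem.Str.isIn needle (pvNorm bp.2 "title") ||
    (pvNorm bp.2 "owner" ≠ "" && PySem.Str.isIn needle (pvNorm bp.2 "owner"))

def match_favorite_bike_id_py_alt (favorite_raw : Option String) (bikes_map : List (Int × List (String × String))) : Option Int :=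
  match favorite_raw with
  | none => none
  | some fav =>
    if fav = "" then none
    else
      let needle := PySem.Str.lower (PySem.Str.strip fav)
      if needle = "" then none
      else
        match bikes_map.find? (pvExact needle) with
        | some bp => some bp.1
        | none => (bikes_map.find? (pvPartial needle)).map (·.1)

-- ===== PRECONDITION & SPEC =====
def Spec_match_favorite_bike_id_py (favorite_raw : Option String) (bikes_map : List (Int × List (String × String))) (out : Option Int) : Prop := out = match_favorite_bike_id_py_alt favorite_raw bikes_map
instance (favorite_raw : Option String) (bikes_map : List (Int × List (String × String))) (out : Option Int) : Decidable (Spec_match_favorite_bike_id_py favorite_raw bikes_map out) := by unfold Spec_match_favorite_bike_id_py; infer_instance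

-- ===== CLAIM (what is proved, stated in full; the proofs are below) =====
def Claim_equal_match_favorite_bike_id_py : Prop := ∀ (favorite_raw : Option String) (bikes_map : List (Int × List (String × String))), Dom_match_favorite_bike_id_py favorite_raw bikes_map → Spec_match_favorite_bike_id_py favorite_raw bikes_map (match_favorite_bike_id_py favorite_raw bikes_map)

-- ===== LEMMAS AND PROOFS =====

-- A's loop body, named for the proof (definitionally the inline lambda in the port).
def pvStep (needle : String) (acc : List Int × List Int) (bp : Int × List (String × String)) :
    List Int × List Int :=
  let title := pvNorm bp.2 "title"
  let owner := pvNorm bp.2 "owner"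
  if title = needle ∨ owner = needle then (acc.1 ++ [bp.1], acc.2)
  else if PySem.Str.isIn needle title ∨ (owner ≠ "" ∧ PySem.Str.isIn needle owner) then
    (acc.1, acc.2 ++ [bp.1])
  else acc

lemma pvStep_eq (needle : String) (acc : List Int × List Int) (bp : Int × List (String × String)) :
    pvStep needle acc bp =
      if pvExact needle bp then (acc.1 ++ [bp.1], acc.2)
      else if pvPartial needle bp then (acc.1, acc.2 ++ [bp.1])
      else acc := by
  simp only [pvStep, pvExact, pvPartial]
  by_cases h1 : pvNorm bp.2 "title" = needle <;>
    by_cases h2 : pvNorm bp.2 "owner" = needle <;>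
      by_cases h3 : PySem.Str.isIn needle (pvNorm bp.2 "title") <;>
        by_cases h4 : pvNorm bp.2 "owner" = "" <;>
          by_cases h5 : PySem.Str.isIn needle (pvNorm bp.2 "owner") <;>
            simp [h1, h2, h4]

lemma pvFoldEq (needle : String) (l : List (Int × List (String × String)))
    (e p : List Int) :
    l.foldl (pvStep needle) (e, p)
      = (e ++ (l.filter (pvExact needle)).map (·.1),
         p ++ (l.filter (fun bp => !pvExact needle bp && pvPartial needle bp)).map (·.1)) := by
  induction l generalizing e p with
  | nil => simp
  | cons hd tl ih =>
    rw [List.foldl_cons, pvStep_eq]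
    by_cases hE : pvExact needle hd
    · simp only [hE, if_true]
      rw [ih]
      simp [hE]
    · simp only [hE, if_false, Bool.false_eq_true]
      by_cases hP : pvPartial needle hd
      · simp only [hP, if_true]
        rw [ih]
        simp [hE, hP]
      · simp only [hP, if_false, Bool.false_eq_true]
        rw [ih]
        simp [hE, hP]

lemma pvHeadFilterMap (q : Int × List (String × String) → Bool)
    (l : List (Int × List (String × String))) :
    ((l.filter q).map (·.1)).head? = (l.find? q).map (·.1) := by
  induction l with
  | nil => rfl
  | cons hd tl ih =>
    by_cases h : q hd <;> simp [List.filter_cons, h, ih]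

-- ===== VERDICT (by name: the statement is the Claim_ definition above) =====
theorem match_favorite_bike_id_py_spec : Claim_equal_match_favorite_bike_id_py := by
  intro favorite_raw bikes_map _
  unfold Spec_match_favorite_bike_id_py match_favorite_bike_id_py match_favorite_bike_id_py_alt
  cases favorite_raw with
  | none => rfl
  | some fav =>
    simp only
    split_ifs with h1 h2
    · rfl
    · rfl
    · set needle := PySem.Str.lower (PySem.Str.strip fav) with hn
      rw [show (fun (acc : List Int × List Int) (bp : Int × List (String × String)) =>
            let title := pvNorm bp.2 "title"
            let owner := pvNorm bp.2 "owner"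
            if title = needle ∨ owner = needle then (acc.1 ++ [bp.1], acc.2)
            else if PySem.Str.isIn needle title ∨ (owner ≠ "" ∧ PySem.Str.isIn needle owner) then
              (acc.1, acc.2 ++ [bp.1])
            else acc) = pvStep needle from rfl]
      rw [pvFoldEq needle bikes_map [] []]
      simp only [List.nil_append]
      rcases hfe : bikes_map.find? (pvExact needle) with _ | bp
      · -- no exact match anywhere: A's elif-filter collapses to the plain partial filter
        have hnone : ∀ x ∈ bikes_map, pvExact needle x = false := by
          intro x hx
          simpa using List.find?_eq_none.mp hfe x hx
        have hfilt : bikes_map.filter (pvExact needle) = [] := by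
          rw [List.filter_eq_nil_iff]
          intro x hx hq
          exact absurd (hnone x hx) (by simp [hq])
        have hcong : bikes_map.filter (fun bp => !pvExact needle bp && pvPartial needle bp)
            = bikes_map.filter (pvPartial needle) := by
          apply List.filter_congr
          intro x hx; simp [hnone x hx]
        rw [hfilt, hcong]
        rcases hfp : bikes_map.find? (pvPartial needle) with _ | pp
        · have : bikes_map.filter (pvPartial needle) = [] := by
            rw [List.filter_eq_nil_iff]
            intro x hx hq
            exact absurd (List.find?_eq_none.mp hfp x hx) (by simp [hq])
          simp [this]
        · have hh := pvHeadFilterMap (pvPartial needle) bikes_map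
          rw [hfp] at hh
          rcases hmf : (bikes_map.filter (pvPartial needle)).map (·.1) with _ | ⟨a, rest⟩
          · rw [hmf] at hh; simp at hh
          · rw [hmf] at hh; simp at hh
            rw [hmf]; simp [hh]
      · have hh := pvHeadFilterMap (pvExact needle) bikes_map
        rw [hfe] at hh
        rcases hmf : (bikes_map.filter (pvExact needle)).map (·.1) with _ | ⟨a, rest⟩
        · rw [hmf] at hh; simp at hh
        · rw [hmf] at hh; simp at hh
          rw [hmf]; simp [hh]
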